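-- pv_equiv track=rewrite | github.com/TurkuNLP/pytorch-registerlabeling | analyse_preds.py | check_list_conditions
-- ===== SOURCE A (Python) =====
-- def check_list_conditions(test_list, conditions):
--     if any("=" in x for x in conditions):
--         conditions = [x.replace("=", "") for x in conditions]
--         return conditions == test_list
--     for condition in conditions:
--         if condition.startswith("+"):
--             # Check item (without the prefix) is in the test list
--             if condition[1:] not in test_list:
--                 return False
--         elif condition.startswith("-"):
--             # Check item (without the prefix) is not in the test list
--             if condition[1:] in test_list:
--                 return False
--         else:
--             if condition not in test_list:
--                 return False
--     return True
-- ===== SOURCE B (Python) =====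
-- def check_list_conditions(test_list, conditions):
--     if any("=" in x for x in conditions):
--         return [x.replace("=", "") for x in conditions] == test_list
--     # classify, then verify by merging sorted lists (two-pointer scans, no per-item membership lookup)
--     required = []
--     forbidden = []
--     for c in conditions:
--         if c.startswith("-"):
--             forbidden.append(c[1:])
--         elif c.startswith("+"):
--             required.append(c[1:])
--         else:
--             required.append(c)
--     ts = sorted(set(test_list))
--     def merge_subset(xs):
--         i = 0
--         for x in xs:
--             while i < len(ts) and ts[i] < x:
--                 i += 1
--             if i == len(ts) or ts[i] != x:
--                 return False
--         return True
--     def merge_disjoint(xs):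
--         i = 0
--         for x in xs:
--             while i < len(ts) and ts[i] < x:
--                 i += 1
--             if i < len(ts) and ts[i] == x:
--                 return False
--         return True
--     return merge_subset(sorted(required)) and merge_disjoint(sorted(forbidden))
-- ===== Notes on version B (the rewrite author's own statement) =====
-- stated objective: alternative
-- what changed: Replaced A's early-returning per-condition membership loop by classify-then-sort-then-merge: conditions are partitioned into required/forbidden item lists, test_list is deduplicated and sorted, and subset/disjointness are decided by two-pointer merges over the sorted lists instead of per-item scans.
import Mathlib
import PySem

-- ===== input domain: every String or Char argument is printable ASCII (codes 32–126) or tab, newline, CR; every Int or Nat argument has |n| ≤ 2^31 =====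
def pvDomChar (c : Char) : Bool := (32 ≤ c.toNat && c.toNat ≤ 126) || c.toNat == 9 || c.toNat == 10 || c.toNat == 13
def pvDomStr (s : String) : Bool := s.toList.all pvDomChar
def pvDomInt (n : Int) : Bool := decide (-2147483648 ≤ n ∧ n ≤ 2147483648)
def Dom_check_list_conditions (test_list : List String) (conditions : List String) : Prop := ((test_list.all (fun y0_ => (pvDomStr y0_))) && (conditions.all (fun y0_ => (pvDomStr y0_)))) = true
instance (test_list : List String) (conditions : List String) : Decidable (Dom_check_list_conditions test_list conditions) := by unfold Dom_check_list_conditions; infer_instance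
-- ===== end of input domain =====

-- B replaces A's early-returning per-condition membership loop by classify-then-
-- sort-then-merge: partition conditions into required/forbidden, sort everything,
-- decide subset/disjointness by two-pointer merges; alternative structure.

-- ===== PORT A =====
-- A's for-loop with early return, as structural recursion over conditions
def checkLoopA (test_list : List String) : List String → Bool
  | [] => true
  | c :: rest =>
    if PySem.Str.startswith c "+" then
      if !(test_list.contains (PySem.Str.slice c (some 1) none)) then false
      else checkLoopA test_list rest
    else if PySem.Str.startswith c "-" then
      if test_list.contains (PySem.Str.slice c (some 1) none) then false
      else checkLoopA test_list rest
    else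
      if !(test_list.contains c) then false
      else checkLoopA test_list rest

def check_list_conditions (test_list : List String) (conditions : List String) : Bool :=
  if conditions.any (fun x => PySem.Str.isIn "=" x) then
    (conditions.map (fun x => PySem.Str.replace x "=" "")) == test_list
  else
    checkLoopA test_list conditions

-- ===== PORT B =====
-- the classifying for-loop of Source B (appends to required/forbidden), as a fold
def classifyB (conditions : List String) : List String × List String :=
  conditions.foldl
    (fun acc c =>
      if PySem.Str.startswith c "-" then (acc.1, acc.2 ++ [PySem.Str.slice c (some 1) none])
      else if PySem.Str.startswith c "+" then (acc.1 ++ [PySem.Str.slice c (some 1) none], acc.2)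
      else (acc.1 ++ [c], acc.2))
    ([], [])

-- merge_subset of Source B: the index i into ts becomes the remaining suffix of ts;
-- the inner while loop is dropWhile (advance past elements < x)
def mergeSubsetB : List String → List String → Bool
  | [], _ => true
  | x :: xs, ts =>
    match ts.dropWhile (fun t => decide (t < x)) with
    | [] => false
    | t :: rest => if t ≠ x then false else mergeSubsetB xs (t :: rest)

-- merge_disjoint of Source B, same suffix representation of the index
def mergeDisjointB : List String → List String → Bool
  | [], _ => true
  | x :: xs, ts =>
    match ts.dropWhile (fun t => decide (t < x)) with
    | [] => mergeDisjointB xs []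
    | t :: rest => if t = x then false else mergeDisjointB xs (t :: rest)

def check_list_conditions_alt (test_list : List String) (conditions : List String) : Bool :=
  if conditions.any (fun x => PySem.Str.isIn "=" x) then
    (conditions.map (fun x => PySem.Str.replace x "=" "")) == test_list
  else
    let rf := classifyB conditions
    let ts := PySem.List.sorted (PySem.Set.ofList test_list) (fun x => x) false
    mergeSubsetB (PySem.List.sorted rf.1 (fun x => x) false) ts &&
    mergeDisjointB (PySem.List.sorted rf.2 (fun x => x) false) ts

-- ===== PRECONDITION & SPEC =====
def Spec_check_list_conditions (test_list : List String) (conditions : List String) (out : Bool) : Prop := out = check_list_conditions_alt test_list conditions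
instance (test_list : List String) (conditions : List String) (out : Bool) : Decidable (Spec_check_list_conditions test_list conditions out) := by unfold Spec_check_list_conditions; infer_instance

-- ===== CLAIM (what is proved, stated in full; the proofs are below) =====
def Claim_equal_check_list_conditions : Prop := ∀ (test_list : List String) (conditions : List String), Dom_check_list_conditions test_list conditions → Spec_check_list_conditions test_list conditions (check_list_conditions test_list conditions)

-- ===== LEMMAS AND PROOFS =====

-- a string starting with "+" does not start with "-"
theorem plus_not_minus (c : String) (h : PySem.Str.startswith c "+" = true) :
    PySem.Str.startswith c "-" = false := by
  by_contra hcon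
  simp only [Bool.not_eq_false] at hcon
  have hp := (PySem.Chars.startswith_iff _ _).mp (by simpa using h)
  have hm := (PySem.Chars.startswith_iff _ _).mp (by simpa using hcon)
  rcases hp with ⟨t1, h1⟩
  rcases hm with ⟨t2, h2⟩
  rw [← h2] at h1
  simp at h1

-- pointwise check A's loop performs for one condition
def condOK (test_list : List String) (c : String) : Bool :=
  if PySem.Str.startswith c "+" then test_list.contains (PySem.Str.slice c (some 1) none)
  else if PySem.Str.startswith c "-" then !(test_list.contains (PySem.Str.slice c (some 1) none))
  else test_list.contains c

theorem checkLoopA_eq_all (test_list : List String) (cs : List String) :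
    checkLoopA test_list cs = cs.all (condOK test_list) := by
  induction cs with
  | nil => rfl
  | cons c rest ih =>
    simp only [checkLoopA, List.all_cons, condOK]
    split_ifs with h1 h2 h3 h4 h5 <;> simp_all

-- the two lists classifyB accumulates, in closed form
def reqOf (cs : List String) : List String :=
  (cs.filter (fun c => !(PySem.Str.startswith c "-"))).map
    (fun c => if PySem.Str.startswith c "+" then PySem.Str.slice c (some 1) none else c)

def forbOf (cs : List String) : List String :=
  (cs.filter (fun c => PySem.Str.startswith c "-")).map
    (fun c => PySem.Str.slice c (some 1) none)

theorem classifyB_spec (cs : List String) (a b : List String) :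
    cs.foldl
      (fun acc c =>
        if PySem.Str.startswith c "-" then (acc.1, acc.2 ++ [PySem.Str.slice c (some 1) none])
        else if PySem.Str.startswith c "+" then (acc.1 ++ [PySem.Str.slice c (some 1) none], acc.2)
        else (acc.1 ++ [c], acc.2))
      (a, b) = (a ++ reqOf cs, b ++ forbOf cs) := by
  induction cs generalizing a b with
  | nil => simp [reqOf, forbOf]
  | cons c rest ih =>
    simp only [List.foldl_cons]
    split_ifs with h1 h2
    · have h1' : PySem.Chars.startswith c.toList ['-'] = true := by simpa using h1
      rw [ih]; simp [reqOf, forbOf, List.filter_cons, h1']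
    · have h1' : PySem.Chars.startswith c.toList ['-'] = false := by simpa using h1
      have h2' : PySem.Chars.startswith c.toList ['+'] = true := by simpa using h2
      rw [ih]; simp [reqOf, forbOf, List.filter_cons, h1', h2']
    · have h1' : PySem.Chars.startswith c.toList ['-'] = false := by simpa using h1
      have h2' : PySem.Chars.startswith c.toList ['+'] = false := by simpa using h2
      rw [ih]; simp [reqOf, forbOf, List.filter_cons, h1', h2']

-- elements dropped by dropWhile (· < x) are < x; membership of y ≥ x is preserved
theorem mem_dropWhile_of_le (ts : List String) (x y : String) (hxy : x ≤ y) :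
    (y ∈ ts.dropWhile (fun t => decide (t < x))) ↔ y ∈ ts := by
  induction ts with
  | nil => simp
  | cons t rest ih =>
    by_cases h : t < x
    · rw [List.dropWhile_cons_of_pos (by simpa using h)]
      rw [ih]
      constructor
      · intro hy; exact List.mem_cons_of_mem _ hy
      · intro hy
        rcases List.mem_cons.mp hy with rfl | hy
        · exact absurd (lt_of_lt_of_le h hxy) (lt_irrefl y)
        · exact hy
    · rw [List.dropWhile_cons_of_neg (by simpa using h)]

-- head of the non-empty result of dropWhile (· < x) is ≥ x
theorem head_dropWhile_ge (ts : List String) (x t : String) (rest : List String)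
    (h : ts.dropWhile (fun t => decide (t < x)) = t :: rest) : x ≤ t := by
  induction ts with
  | nil => simp at h
  | cons u rest' ih =>
    by_cases hu : u < x
    · rw [List.dropWhile_cons_of_pos (by simpa using hu)] at h
      exact ih h
    · rw [List.dropWhile_cons_of_neg (by simpa using hu)] at h
      cases h
      exact le_of_not_gt hu

-- pointwise agreement gives equal `all`
theorem all_congr_mem {α : Type} (l : List α) (p q : α → Bool)
    (h : ∀ x ∈ l, p x = q x) : l.all p = l.all q := by
  induction l with
  | nil => rfl
  | cons a l ih =>
    simp only [List.all_cons, h a (List.mem_cons_self), ih (fun x hx => h x (List.mem_cons_of_mem a hx))]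

-- correctness of the subset merge: on a ≤-sorted xs and a <-sorted ts it decides xs ⊆ ts
theorem mergeSubsetB_spec (xs ts : List String)
    (hxs : xs.Pairwise (· ≤ ·)) (hts : ts.Pairwise (· < ·)) :
    mergeSubsetB xs ts = xs.all (fun x => ts.contains x) := by
  induction xs generalizing ts with
  | nil => rfl
  | cons x xs ih =>
    have hx : ∀ y ∈ xs, x ≤ y := (List.pairwise_cons.mp hxs).1
    have hxs' := (List.pairwise_cons.mp hxs).2
    have hmemx := mem_dropWhile_of_le ts x x le_rfl
    simp only [mergeSubsetB, List.all_cons]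
    cases hd : ts.dropWhile (fun t => decide (t < x)) with
    | nil =>
      have : ¬ x ∈ ts := by rw [← hmemx, hd]; simp
      simp [this]
    | cons t rest =>
      dsimp only
      have hxt : x ≤ t := head_dropWhile_ge ts x t rest hd
      have hdrest : (t :: rest).Pairwise (· < ·) := by
        rw [← hd]; exact List.Pairwise.sublist (List.dropWhile_sublist _) hts
      by_cases het : t = x
      · subst het
        have hxin : t ∈ ts := by rw [← hmemx, hd]; exact List.mem_cons_self
        rw [if_neg (by simp)]
        rw [ih (t :: rest) hxs' hdrest]
        have heq : xs.all (fun y => (t :: rest).contains y) = xs.all (fun y => ts.contains y) := by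
          apply all_congr_mem
          intro y hy
          have hmem := mem_dropWhile_of_le ts t y (hx y hy)
          rw [hd] at hmem
          simp only [List.contains_eq_mem]
          exact decide_eq_decide.mpr hmem
        rw [heq]
        simp
        exact fun _ => hxin
      · have hxnin : ¬ x ∈ ts := by
          rw [← hmemx, hd]
          intro hmem
          rcases List.mem_cons.mp hmem with rfl | hmem
          · exact het rfl
          · have := (List.pairwise_cons.mp hdrest).1 x hmem
            exact absurd (lt_of_le_of_lt hxt this) (lt_irrefl x)
        rw [if_pos het]
        simp [hxnin]

-- the disjoint merge on an empty remaining suffix always succeeds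
theorem mergeDisjointB_nil (xs : List String) : mergeDisjointB xs [] = true := by
  induction xs with
  | nil => rfl
  | cons x xs ih => simpa [mergeDisjointB] using ih

-- correctness of the disjoint merge: on a ≤-sorted xs and a <-sorted ts it decides xs ∩ ts = ∅
theorem mergeDisjointB_spec (xs ts : List String)
    (hxs : xs.Pairwise (· ≤ ·)) (hts : ts.Pairwise (· < ·)) :
    mergeDisjointB xs ts = xs.all (fun x => !(ts.contains x)) := by
  induction xs generalizing ts with
  | nil => rfl
  | cons x xs ih =>
    have hx : ∀ y ∈ xs, x ≤ y := (List.pairwise_cons.mp hxs).1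
    have hxs' := (List.pairwise_cons.mp hxs).2
    have hmemx := mem_dropWhile_of_le ts x x le_rfl
    simp only [mergeDisjointB, List.all_cons]
    cases hd : ts.dropWhile (fun t => decide (t < x)) with
    | nil =>
      dsimp only
      have hxnin : ¬ x ∈ ts := by rw [← hmemx, hd]; simp
      have hys : ∀ y ∈ xs, ¬ y ∈ ts := by
        intro y hy
        rw [← mem_dropWhile_of_le ts x y (hx y hy), hd]; simp
      rw [mergeDisjointB_nil]
      have hall : xs.all (fun y => !(ts.contains y)) = true := by
        simp only [List.all_eq_true]
        intro y hy
        simpa using hys y hy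
      have hcx : ts.contains x = false := by simpa using hxnin
      rw [hcx, hall]
      simp
    | cons t rest =>
      dsimp only
      have hxt : x ≤ t := head_dropWhile_ge ts x t rest hd
      have hdrest : (t :: rest).Pairwise (· < ·) := by
        rw [← hd]; exact List.Pairwise.sublist (List.dropWhile_sublist _) hts
      by_cases het : t = x
      · subst het
        have hxin : t ∈ ts := by rw [← hmemx, hd]; exact List.mem_cons_self
        simp [hxin]
      · have hxnin : ¬ x ∈ ts := by
          rw [← hmemx, hd]
          intro hmem
          rcases List.mem_cons.mp hmem with rfl | hmem
          · exact het rfl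
          · have := (List.pairwise_cons.mp hdrest).1 x hmem
            exact absurd (lt_of_le_of_lt hxt this) (lt_irrefl x)
        rw [if_neg het]
        rw [ih (t :: rest) hxs' hdrest]
        have heq : xs.all (fun y => !((t :: rest).contains y)) = xs.all (fun y => !(ts.contains y)) := by
          apply all_congr_mem
          intro y hy
          have hmem := mem_dropWhile_of_le ts x y (hx y hy)
          rw [hd] at hmem
          simp only [List.contains_eq_mem]
          rw [decide_eq_decide.mpr hmem]
        rw [heq]
        simp
        exact fun _ => hxnin

-- the two alls over required/forbidden equal A's per-condition all
theorem alls_eq_condOK (test_list : List String) (cs : List String) :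
    ((reqOf cs).all (fun x => test_list.contains x) &&
     (forbOf cs).all (fun x => !(test_list.contains x)))
    = cs.all (condOK test_list) := by
  rw [Bool.eq_iff_iff]
  simp only [Bool.and_eq_true, List.all_eq_true, reqOf, forbOf, List.mem_map, List.mem_filter]
  constructor
  · rintro ⟨hreq, hforb⟩ c hc
    unfold condOK
    split_ifs with h1 h2
    · have hm : PySem.Str.startswith c "-" = false := plus_not_minus c h1
      have := hreq _ ⟨c, ⟨hc, by simpa using hm⟩, rfl⟩
      rw [if_pos h1] at this
      simpa using this
    · simpa using hforb _ ⟨c, ⟨hc, h2⟩, rfl⟩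
    · have h2' : PySem.Str.startswith c "-" = false := eq_false_of_ne_true h2
      have := hreq _ ⟨c, ⟨hc, by simpa using h2'⟩, rfl⟩
      rw [if_neg (by simpa using h1)] at this
      simpa using this
  · intro hall
    constructor
    · rintro r ⟨c, ⟨hc, hns⟩, rfl⟩
      have := hall c hc
      unfold condOK at this
      simp only [Bool.not_eq_eq_eq_not, Bool.not_true] at hns
      rw [hns] at this
      split_ifs with h1 <;> simp_all
    · rintro f ⟨c, ⟨hc, hs⟩, rfl⟩
      have := hall c hc
      unfold condOK at this
      have hne : PySem.Str.startswith c "+" = false := by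
        by_contra h
        simp only [Bool.not_eq_false] at h
        have := plus_not_minus c h
        rw [hs] at this
        exact absurd this (by simp)
      rw [hne, hs] at this
      simpa using this

-- membership in sorted(set(test_list)) is membership in test_list
theorem contains_sorted_set (test_list : List String) (x : String) :
    (PySem.List.sorted (PySem.Set.ofList test_list) (fun x => x) false).contains x
      = test_list.contains x := by
  simp only [List.contains_eq_mem]
  exact decide_eq_decide.mpr (by rw [PySem.List.mem_sorted, PySem.Set.mem_ofList])

-- ===== VERDICT (by name: the statement is the Claim_ definition above) =====
theorem check_list_conditions_spec : Claim_equal_check_list_conditions := by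
  intro test_list conditions _
  unfold Spec_check_list_conditions check_list_conditions check_list_conditions_alt
  split_ifs with h
  · rfl
  · have hcl : classifyB conditions = (reqOf conditions, forbOf conditions) := by
      simpa using classifyB_spec conditions [] []
    simp only [hcl]
    have hts := PySem.List.sorted_ofList_pairwise_lt (xs := test_list)
    have hreq : (PySem.List.sorted (reqOf conditions) (fun x => x) false).Pairwise (· ≤ ·) := by
      simpa using PySem.List.sorted_pairwise (reqOf conditions) (fun x => x)
    have hforb : (PySem.List.sorted (forbOf conditions) (fun x => x) false).Pairwise (· ≤ ·) := by
      simpa using PySem.List.sorted_pairwise (forbOf conditions) (fun x => x)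
    rw [mergeSubsetB_spec _ _ hreq hts, mergeDisjointB_spec _ _ hforb hts]
    have e1 : (PySem.List.sorted (reqOf conditions) (fun x => x) false).all
        (fun x => (PySem.List.sorted (PySem.Set.ofList test_list) (fun x => x) false).contains x)
        = (reqOf conditions).all (fun x => test_list.contains x) := by
      rw [Bool.eq_iff_iff]
      simp only [List.all_eq_true, PySem.List.mem_sorted, contains_sorted_set]
    have e2 : (PySem.List.sorted (forbOf conditions) (fun x => x) false).all
        (fun x => !((PySem.List.sorted (PySem.Set.ofList test_list) (fun x => x) false).contains x))
        = (forbOf conditions).all (fun x => !(test_list.contains x)) := by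
      rw [Bool.eq_iff_iff]
      simp only [List.all_eq_true, PySem.List.mem_sorted, contains_sorted_set]
    rw [e1, e2, alls_eq_condOK, ← checkLoopA_eq_all]
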